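-- pv_equiv track=rewrite | github.com/taggedzi/tz-player | src/tz_player/visualizers/hackscope.py | _locate_phase
-- ===== SOURCE A (Python) =====
-- _PHASES: tuple[tuple[str, int], ...] = (
--     ("BOOT", 24),
--     ("ICE", 60),
--     ("MAP", 45),
--     ("DEFRAG", 42),
--     ("SCAN", 36),
--     ("DECRYPT", 60),
--     ("EXTRACT", 39),
--     ("COVER", 33),
--     ("DOSSIER", 45),
-- )
--
-- def _locate_phase(global_frame: int) -> tuple[str, int, int]:
--     remaining = max(0, int(global_frame))
--     for name, count in _PHASES:
--         if remaining < count: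
--             return name, remaining, count
--         remaining -= count
--     last_name, last_count = _PHASES[-1]
--     return last_name, last_count - 1, last_count
-- ===== SOURCE B (Python) =====
-- _PHASES: tuple[tuple[str, int], ...] = (
--     ("BOOT", 24),
--     ("ICE", 60),
--     ("MAP", 45),
--     ("DEFRAG", 42),
--     ("SCAN", 36),
--     ("DECRYPT", 60),
--     ("EXTRACT", 39),
--     ("COVER", 33),
--     ("DOSSIER", 45),
-- )
--
-- # Precomputed once: cumulative end-frame of each phase, and the total length.
-- _PREFIX: list[int] = []
-- _acc = 0
-- for _name, _count in _PHASES: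
--     _acc += _count
--     _PREFIX.append(_acc)
-- _TOTAL = _acc
--
--
-- def _locate_phase(global_frame: int) -> tuple[str, int, int]:
--     remaining = max(0, int(global_frame))
--     if remaining >= _TOTAL:
--         last_name, last_count = _PHASES[-1]
--         return last_name, last_count - 1, last_count
--     # binary search: first index i with remaining < _PREFIX[i]
--     lo, hi = 0, len(_PREFIX)
--     while lo < hi:
--         mid = (lo + hi) // 2
--         if remaining < _PREFIX[mid]:
--             hi = mid
--         else:
--             lo = mid + 1
--     name, count = _PHASES[lo]
--     start = _PREFIX[lo - 1] if lo else 0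
--     return name, remaining - start, count
-- ===== Notes on version B (the rewrite author's own statement) =====
-- stated objective: alternative
-- what changed: Replaced A's linear subtract-and-fall-through scan over _PHASES with a once-precomputed prefix-sum boundary table, an explicit >= total clamp, and a hand-written binary search (bisect_right) for the phase index.
import Mathlib
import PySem

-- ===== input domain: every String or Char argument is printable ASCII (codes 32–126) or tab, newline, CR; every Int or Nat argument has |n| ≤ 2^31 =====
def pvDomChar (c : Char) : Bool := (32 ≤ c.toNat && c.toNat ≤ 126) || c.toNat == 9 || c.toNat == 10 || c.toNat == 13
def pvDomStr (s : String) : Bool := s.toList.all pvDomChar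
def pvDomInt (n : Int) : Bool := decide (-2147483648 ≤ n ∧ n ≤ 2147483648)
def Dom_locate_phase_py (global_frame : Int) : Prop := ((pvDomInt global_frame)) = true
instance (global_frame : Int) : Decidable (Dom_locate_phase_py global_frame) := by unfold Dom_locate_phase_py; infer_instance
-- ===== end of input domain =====

-- ===== PORT A =====
-- B replaces A's linear subtract-and-fall-through scan over _PHASES by a precomputed
-- prefix-sum table with a binary search (objective: alternative decomposition).

def phasesA : List (String × Int) :=
  [("BOOT", 24), ("ICE", 60), ("MAP", 45), ("DEFRAG", 42), ("SCAN", 36),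
   ("DECRYPT", 60), ("EXTRACT", 39), ("COVER", 33), ("DOSSIER", 45)]

-- the for-loop with early return: structural recursion over the phase list
def scanA : List (String × Int) → Int → Option (String × Int × Int)
  | [], _ => none
  | (name, count) :: rest, remaining =>
      if remaining < count then some (name, remaining, count)
      else scanA rest (remaining - count)

def locate_phase_py (global_frame : Int) : String × Int × Int :=
  let remaining := max 0 global_frame
  match scanA phasesA remaining with
  | some r => r
  | none =>
      match (PySem.List.pyGet? phasesA (-1)).getD ("", 0) with
      | (last_name, last_count) => (last_name, last_count - 1, last_count)

-- ===== PORT B =====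

def prefixB : List Int := [24, 84, 129, 171, 207, 267, 306, 339, 384]

def totalB : Int := 384

-- hand-written bisect-right loop of Source B: while lo < hi … ; termination on hi - lo
def bsearchB (remaining : Int) (lo hi : Nat) : Nat :=
  if lo < hi then
    let mid := (lo + hi) / 2
    if remaining < prefixB.getD mid 0 then bsearchB remaining lo mid
    else bsearchB remaining (mid + 1) hi
  else lo
termination_by hi - lo
decreasing_by all_goals omega

def locate_phase_py_alt (global_frame : Int) : String × Int × Int :=
  let remaining := max 0 global_frame
  if remaining ≥ totalB then
    match (PySem.List.pyGet? phasesA (-1)).getD ("", 0) with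
    | (last_name, last_count) => (last_name, last_count - 1, last_count)
  else
    let lo := bsearchB remaining 0 prefixB.length
    match phasesA.getD lo ("", 0) with
    | (name, count) =>
        let start := if lo = 0 then 0 else prefixB.getD (lo - 1) 0
        (name, remaining - start, count)

-- ===== PRECONDITION & SPEC =====
def Spec_locate_phase_py (global_frame : Int) (out : String × Int × Int) : Prop := out = locate_phase_py_alt global_frame
instance (global_frame : Int) (out : String × Int × Int) : Decidable (Spec_locate_phase_py global_frame out) := by unfold Spec_locate_phase_py; infer_instance

-- ===== CLAIM (what is proved, stated in full; the proofs are below) =====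
def Claim_equal_locate_phase_py : Prop := ∀ (global_frame : Int), Dom_locate_phase_py global_frame → Spec_locate_phase_py global_frame (locate_phase_py global_frame)

-- ===== LEMMAS AND PROOFS =====

-- ===== VERDICT (by name: the statement is the Claim_ definition above) =====
theorem locate_phase_py_spec : Claim_equal_locate_phase_py := by
  intro gf _
  unfold Spec_locate_phase_py
  have h0 : (0:Int) ≤ max 0 gf := le_max_left _ _
  by_cases h0 : max 0 gf < 24
  · simp [locate_phase_py, locate_phase_py_alt, scanA, phasesA, totalB, prefixB, bsearchB,
      PySem.List.pyGet?, show max 0 gf < 24 by omega,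
      show max 0 gf < 84 by omega,
      show max 0 gf < 129 by omega,
      show max 0 gf < 171 by omega,
      show max 0 gf < 207 by omega,
      show max 0 gf < 267 by omega,
      show max 0 gf < 306 by omega,
      show max 0 gf < 339 by omega,
      show max 0 gf < 384 by omega,
      show (max 0 gf < 24) by omega,
      show ¬ max 0 gf ≥ 384 by omega]
    try omega
  by_cases h1 : max 0 gf < 84
  · simp [locate_phase_py, locate_phase_py_alt, scanA, phasesA, totalB, prefixB, bsearchB,
      PySem.List.pyGet?, show ¬ max 0 gf < 24 by omega,
      show max 0 gf < 84 by omega,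
      show max 0 gf < 129 by omega,
      show max 0 gf < 171 by omega,
      show max 0 gf < 207 by omega,
      show max 0 gf < 267 by omega,
      show max 0 gf < 306 by omega,
      show max 0 gf < 339 by omega,
      show max 0 gf < 384 by omega,
      show ¬ (max 0 gf < 24) by omega,
      show (max 0 gf - 24 < 60) by omega,
      show ¬ max 0 gf ≥ 384 by omega]
    try omega
  by_cases h2 : max 0 gf < 129
  · simp [locate_phase_py, locate_phase_py_alt, scanA, phasesA, totalB, prefixB, bsearchB,
      PySem.List.pyGet?, show ¬ max 0 gf < 24 by omega,
      show ¬ max 0 gf < 84 by omega,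
      show max 0 gf < 129 by omega,
      show max 0 gf < 171 by omega,
      show max 0 gf < 207 by omega,
      show max 0 gf < 267 by omega,
      show max 0 gf < 306 by omega,
      show max 0 gf < 339 by omega,
      show max 0 gf < 384 by omega,
      show ¬ (max 0 gf < 24) by omega,
      show ¬ (max 0 gf - 24 < 60) by omega,
      show (max 0 gf - 24 - 60 < 45) by omega,
      show ¬ max 0 gf ≥ 384 by omega]
    try omega
  by_cases h3 : max 0 gf < 171
  · simp [locate_phase_py, locate_phase_py_alt, scanA, phasesA, totalB, prefixB, bsearchB,
      PySem.List.pyGet?, show ¬ max 0 gf < 24 by omega,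
      show ¬ max 0 gf < 84 by omega,
      show ¬ max 0 gf < 129 by omega,
      show max 0 gf < 171 by omega,
      show max 0 gf < 207 by omega,
      show max 0 gf < 267 by omega,
      show max 0 gf < 306 by omega,
      show max 0 gf < 339 by omega,
      show max 0 gf < 384 by omega,
      show ¬ (max 0 gf < 24) by omega,
      show ¬ (max 0 gf - 24 < 60) by omega,
      show ¬ (max 0 gf - 24 - 60 < 45) by omega,
      show (max 0 gf - 24 - 60 - 45 < 42) by omega,
      show ¬ max 0 gf ≥ 384 by omega]
    try omega
  by_cases h4 : max 0 gf < 207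
  · simp [locate_phase_py, locate_phase_py_alt, scanA, phasesA, totalB, prefixB, bsearchB,
      PySem.List.pyGet?, show ¬ max 0 gf < 24 by omega,
      show ¬ max 0 gf < 84 by omega,
      show ¬ max 0 gf < 129 by omega,
      show ¬ max 0 gf < 171 by omega,
      show max 0 gf < 207 by omega,
      show max 0 gf < 267 by omega,
      show max 0 gf < 306 by omega,
      show max 0 gf < 339 by omega,
      show max 0 gf < 384 by omega,
      show ¬ (max 0 gf < 24) by omega,
      show ¬ (max 0 gf - 24 < 60) by omega,
      show ¬ (max 0 gf - 24 - 60 < 45) by omega,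
      show ¬ (max 0 gf - 24 - 60 - 45 < 42) by omega,
      show (max 0 gf - 24 - 60 - 45 - 42 < 36) by omega,
      show ¬ max 0 gf ≥ 384 by omega]
    try omega
  by_cases h5 : max 0 gf < 267
  · simp [locate_phase_py, locate_phase_py_alt, scanA, phasesA, totalB, prefixB, bsearchB,
      PySem.List.pyGet?, show ¬ max 0 gf < 24 by omega,
      show ¬ max 0 gf < 84 by omega,
      show ¬ max 0 gf < 129 by omega,
      show ¬ max 0 gf < 171 by omega,
      show ¬ max 0 gf < 207 by omega,
      show max 0 gf < 267 by omega,
      show max 0 gf < 306 by omega,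
      show max 0 gf < 339 by omega,
      show max 0 gf < 384 by omega,
      show ¬ (max 0 gf < 24) by omega,
      show ¬ (max 0 gf - 24 < 60) by omega,
      show ¬ (max 0 gf - 24 - 60 < 45) by omega,
      show ¬ (max 0 gf - 24 - 60 - 45 < 42) by omega,
      show ¬ (max 0 gf - 24 - 60 - 45 - 42 < 36) by omega,
      show (max 0 gf - 24 - 60 - 45 - 42 - 36 < 60) by omega,
      show ¬ max 0 gf ≥ 384 by omega]
    try omega
  by_cases h6 : max 0 gf < 306
  · simp [locate_phase_py, locate_phase_py_alt, scanA, phasesA, totalB, prefixB, bsearchB,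
      PySem.List.pyGet?, show ¬ max 0 gf < 24 by omega,
      show ¬ max 0 gf < 84 by omega,
      show ¬ max 0 gf < 129 by omega,
      show ¬ max 0 gf < 171 by omega,
      show ¬ max 0 gf < 207 by omega,
      show ¬ max 0 gf < 267 by omega,
      show max 0 gf < 306 by omega,
      show max 0 gf < 339 by omega,
      show max 0 gf < 384 by omega,
      show ¬ (max 0 gf < 24) by omega,
      show ¬ (max 0 gf - 24 < 60) by omega,
      show ¬ (max 0 gf - 24 - 60 < 45) by omega,
      show ¬ (max 0 gf - 24 - 60 - 45 < 42) by omega,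
      show ¬ (max 0 gf - 24 - 60 - 45 - 42 < 36) by omega,
      show ¬ (max 0 gf - 24 - 60 - 45 - 42 - 36 < 60) by omega,
      show (max 0 gf - 24 - 60 - 45 - 42 - 36 - 60 < 39) by omega,
      show ¬ max 0 gf ≥ 384 by omega]
    try omega
  by_cases h7 : max 0 gf < 339
  · simp [locate_phase_py, locate_phase_py_alt, scanA, phasesA, totalB, prefixB, bsearchB,
      PySem.List.pyGet?, show ¬ max 0 gf < 24 by omega,
      show ¬ max 0 gf < 84 by omega,
      show ¬ max 0 gf < 129 by omega,
      show ¬ max 0 gf < 171 by omega,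
      show ¬ max 0 gf < 207 by omega,
      show ¬ max 0 gf < 267 by omega,
      show ¬ max 0 gf < 306 by omega,
      show max 0 gf < 339 by omega,
      show max 0 gf < 384 by omega,
      show ¬ (max 0 gf < 24) by omega,
      show ¬ (max 0 gf - 24 < 60) by omega,
      show ¬ (max 0 gf - 24 - 60 < 45) by omega,
      show ¬ (max 0 gf - 24 - 60 - 45 < 42) by omega,
      show ¬ (max 0 gf - 24 - 60 - 45 - 42 < 36) by omega,
      show ¬ (max 0 gf - 24 - 60 - 45 - 42 - 36 < 60) by omega,
      show ¬ (max 0 gf - 24 - 60 - 45 - 42 - 36 - 60 < 39) by omega,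
      show (max 0 gf - 24 - 60 - 45 - 42 - 36 - 60 - 39 < 33) by omega,
      show ¬ max 0 gf ≥ 384 by omega]
    try omega
  by_cases h8 : max 0 gf < 384
  · simp [locate_phase_py, locate_phase_py_alt, scanA, phasesA, totalB, prefixB, bsearchB,
      PySem.List.pyGet?, show ¬ max 0 gf < 24 by omega,
      show ¬ max 0 gf < 84 by omega,
      show ¬ max 0 gf < 129 by omega,
      show ¬ max 0 gf < 171 by omega,
      show ¬ max 0 gf < 207 by omega,
      show ¬ max 0 gf < 267 by omega,
      show ¬ max 0 gf < 306 by omega,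
      show ¬ max 0 gf < 339 by omega,
      show max 0 gf < 384 by omega,
      show ¬ (max 0 gf < 24) by omega,
      show ¬ (max 0 gf - 24 < 60) by omega,
      show ¬ (max 0 gf - 24 - 60 < 45) by omega,
      show ¬ (max 0 gf - 24 - 60 - 45 < 42) by omega,
      show ¬ (max 0 gf - 24 - 60 - 45 - 42 < 36) by omega,
      show ¬ (max 0 gf - 24 - 60 - 45 - 42 - 36 < 60) by omega,
      show ¬ (max 0 gf - 24 - 60 - 45 - 42 - 36 - 60 < 39) by omega,
      show ¬ (max 0 gf - 24 - 60 - 45 - 42 - 36 - 60 - 39 < 33) by omega,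
      show (max 0 gf - 24 - 60 - 45 - 42 - 36 - 60 - 39 - 33 < 45) by omega,
      show ¬ max 0 gf ≥ 384 by omega]
    try omega
  simp [locate_phase_py, locate_phase_py_alt, scanA, phasesA, totalB, prefixB, bsearchB,
      PySem.List.pyGet?, show ¬ max 0 gf < 24 by omega,
      show ¬ max 0 gf < 84 by omega,
      show ¬ max 0 gf < 129 by omega,
      show ¬ max 0 gf < 171 by omega,
      show ¬ max 0 gf < 207 by omega,
      show ¬ max 0 gf < 267 by omega,
      show ¬ max 0 gf < 306 by omega,
      show ¬ max 0 gf < 339 by omega,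
      show ¬ max 0 gf < 384 by omega,
      show ¬ (max 0 gf < 24) by omega,
      show ¬ (max 0 gf - 24 < 60) by omega,
      show ¬ (max 0 gf - 24 - 60 < 45) by omega,
      show ¬ (max 0 gf - 24 - 60 - 45 < 42) by omega,
      show ¬ (max 0 gf - 24 - 60 - 45 - 42 < 36) by omega,
      show ¬ (max 0 gf - 24 - 60 - 45 - 42 - 36 < 60) by omega,
      show ¬ (max 0 gf - 24 - 60 - 45 - 42 - 36 - 60 < 39) by omega,
      show ¬ (max 0 gf - 24 - 60 - 45 - 42 - 36 - 60 - 39 < 33) by omega,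
      show ¬ (max 0 gf - 24 - 60 - 45 - 42 - 36 - 60 - 39 - 33 < 45) by omega,
      show max 0 gf ≥ 384 by omega]
  try omega
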